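-- pv_equiv track=rewrite | github.com/KWONILCHEOL/Python | STUDY/18주차/[kakao][2018][blind]프렌즈4블록 - 복사본.py | solution
-- ===== SOURCE A (Python) =====
-- def solution(m, n, board):
--     answer = 0
--     board = list(map(list, zip(*board)))
--     for s in board : s.reverse()
--     while True:
--         temp = set()
--         for i in range(n - 1):
--             for j in range(m - 1):
--                 if len(board[i]) > j + 1:
--                     if len(board[i+1]) > j + 1:
--                         if board[i][j] == board[i+1][j] == board[i][j+1] == board[i+1][j+1]:
--                             temp.add((i, j))
--                             temp.add((i+1, j))
--                             temp.add((i, j+1))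
--                             temp.add((i+1, j+1))
--         if len(temp) == 0:
--             break
--
--         temp = sorted(list(temp), key=lambda x : x[1], reverse=True)
--         answer += len(temp)
--         for i,j in temp:
--             board[i] = board[i][:j] + board[i][j+1:]
--     return answer
-- ===== SOURCE B (Python) =====
-- def solution(m, n, board):
--     H = len(board)
--     g = [list(row) for row in board]
--     answer = 0
--     while True:
--         marked = set()
--         for r in range(H - 1):
--             for c in range(n - 1):
--                 v = g[r][c]
--                 if v is not None and v == g[r][c + 1] == g[r + 1][c] == g[r + 1][c + 1]:
--                     marked |= {(r, c), (r, c + 1), (r + 1, c), (r + 1, c + 1)}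
--         if not marked:
--             return answer
--         answer += len(marked)
--         for r, c in marked:
--             g[r][c] = None
--         for c in range(n):
--             col = [g[r][c] for r in range(H) if g[r][c] is not None]
--             col = [None] * (H - len(col)) + col
--             for r in range(H):
--                 g[r][c] = col[r]
-- ===== Notes on version B (the rewrite author's own statement) =====
-- stated objective: alternative
-- what changed: B keeps the board as the given row-major grid with None sentinels, marks whole 2x2 blocks in place and applies per-column gravity, instead of A's transposed-and-reversed variable-length column lists shrunk by sorted slicing deletions.
-- outside the precondition, e.g. on solution(2, 2, ['aa', 'aa', 'ba']): A returns 0, B returns 4; on solution(2, 2, ['a']): A returns 0, B returns 0; on solution(2, 2, []): A raises IndexError, B returns 0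
import Mathlib
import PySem

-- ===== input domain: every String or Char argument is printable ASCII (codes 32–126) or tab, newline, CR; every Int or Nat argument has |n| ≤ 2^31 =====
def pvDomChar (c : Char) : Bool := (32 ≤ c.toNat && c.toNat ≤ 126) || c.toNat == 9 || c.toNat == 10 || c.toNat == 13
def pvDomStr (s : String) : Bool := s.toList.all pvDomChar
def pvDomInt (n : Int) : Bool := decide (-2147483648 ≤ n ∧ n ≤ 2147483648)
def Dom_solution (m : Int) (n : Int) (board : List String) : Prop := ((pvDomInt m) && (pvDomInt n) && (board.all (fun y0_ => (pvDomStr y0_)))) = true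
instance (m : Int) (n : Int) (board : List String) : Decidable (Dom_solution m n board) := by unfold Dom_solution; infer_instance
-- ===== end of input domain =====

-- B keeps the board as the given row-major grid with `none` sentinels and per-column gravity,
-- instead of A's transposed, reversed, slicing-shrunk columns (objective: alternative; same asymptotic cost).

-- ===== PORT A =====

-- zip(*rows) then list(map(list, ·)): one list per column position, up to the shortest row
def pyZipStar (rows : List (List Char)) : List (List Char) :=
  match rows with
  | [] => []
  | r :: _ =>
    (List.range (rows.foldl (fun a s => min a s.length) r.length)).map
      (fun c => rows.filterMap (fun s => s[c]?))

-- the nested `for i / for j` loops of A building the set `temp`;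
-- where Python raises IndexError (board[i] out of range) the port reads a default (excluded by Pre_)
def scanA (m n : Int) (cols : List (List Char)) : PySem.Set (Int × Int) :=
  (PySem.List.pyRange 0 (n-1) 1).foldl (fun t i =>
    (PySem.List.pyRange 0 (m-1) 1).foldl (fun t j =>
      if ((PySem.List.pyGetD cols i []).length : Int) > j + 1 then
        if ((PySem.List.pyGetD cols (i+1) []).length : Int) > j + 1 then
          if PySem.List.pyGetD (PySem.List.pyGetD cols i []) j ' ' = PySem.List.pyGetD (PySem.List.pyGetD cols (i+1) []) j ' '
              ∧ PySem.List.pyGetD (PySem.List.pyGetD cols i []) j ' ' = PySem.List.pyGetD (PySem.List.pyGetD cols i []) (j+1) ' '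
              ∧ PySem.List.pyGetD (PySem.List.pyGetD cols i []) j ' ' = PySem.List.pyGetD (PySem.List.pyGetD cols (i+1) []) (j+1) ' ' then
            PySem.Set.add (PySem.Set.add (PySem.Set.add (PySem.Set.add t (i,j)) (i+1,j)) (i,j+1)) (i+1,j+1)
          else t
        else t
      else t) t) PySem.Set.empty

-- `for i,j in temp: board[i] = board[i][:j] + board[i][j+1:]`
def removeA (temp : List (Int × Int)) (cols : List (List Char)) : List (List Char) :=
  temp.foldl (fun cs p =>
    PySem.List.pySetD cs p.1
      (PySem.List.slice (PySem.List.pyGetD cs p.1 []) none (some p.2) ++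
       PySem.List.slice (PySem.List.pyGetD cs p.1 []) (some (p.2+1)) none)) cols

-- A's `while True`; fuel is only a totality guard: every executed pass removes at least four
-- cells, so `total number of cells + 1` passes are never exhausted
def loopA (m n : Int) (fuel : Nat) (cols : List (List Char)) (answer : Int) : Int :=
  match fuel with
  | 0 => answer
  | fuel + 1 =>
    let temp := scanA m n cols
    if temp = [] then answer
    else loopA m n fuel (removeA (PySem.List.sorted temp (fun p => p.2) true) cols)
           (answer + (temp.length : Int))

def solution (m : Int) (n : Int) (board : List String) : Int :=
  let cols := (pyZipStar (board.map String.toList)).map List.reverse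
  loopA m n ((cols.map List.length).sum + 1) cols 0

-- ===== PORT B =====

-- the `for r / for c` scan of Source B building `marked`
def scanB (n : Int) (H : Int) (g : List (List (Option Char))) : PySem.Set (Int × Int) :=
  (PySem.List.pyRange 0 (H-1) 1).foldl (fun t r =>
    (PySem.List.pyRange 0 (n-1) 1).foldl (fun t c =>
      let v := PySem.List.pyGetD (PySem.List.pyGetD g r []) c none
      if v ≠ none ∧ v = PySem.List.pyGetD (PySem.List.pyGetD g r []) (c+1) none
          ∧ v = PySem.List.pyGetD (PySem.List.pyGetD g (r+1) []) c none
          ∧ v = PySem.List.pyGetD (PySem.List.pyGetD g (r+1) []) (c+1) none then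
        PySem.Set.update t [(r,c), (r,c+1), (r+1,c), (r+1,c+1)]
      else t) t) PySem.Set.empty

-- `for r, c in marked: g[r][c] = None`
def markB (marked : List (Int × Int)) (g : List (List (Option Char))) : List (List (Option Char)) :=
  marked.foldl (fun g p =>
    PySem.List.pySetD g p.1 (PySem.List.pySetD (PySem.List.pyGetD g p.1 []) p.2 none)) g

-- per-column gravity: surviving cells fall to the bottom, `None` fills the top
def gravityB (n : Int) (H : Int) (g : List (List (Option Char))) : List (List (Option Char)) :=
  (PySem.List.pyRange 0 n 1).foldl (fun g c =>
    let col := (PySem.List.pyRange 0 H 1).foldl (fun acc r =>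
      if PySem.List.pyGetD (PySem.List.pyGetD g r []) c none ≠ none then
        acc ++ [PySem.List.pyGetD (PySem.List.pyGetD g r []) c none]
      else acc) []
    let col := List.replicate (H.toNat - col.length) (none : Option Char) ++ col
    (PySem.List.pyRange 0 H 1).foldl (fun g r =>
      PySem.List.pySetD g r
        (PySem.List.pySetD (PySem.List.pyGetD g r []) c (PySem.List.pyGetD col r none))) g) g

-- Source B's `while True`; same totality-guard fuel as in A's port
def loopB (n : Int) (H : Int) (fuel : Nat) (g : List (List (Option Char))) (answer : Int) : Int :=
  match fuel with
  | 0 => answer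
  | fuel + 1 =>
    let marked := scanB n H g
    if marked = [] then answer
    else loopB n H fuel (gravityB n H (markB marked g)) (answer + (marked.length : Int))

def solution_alt (m : Int) (n : Int) (board : List String) : Int :=
  let g := board.map (fun row => row.toList.map (fun ch => (some ch : Option Char)))
  loopB n (board.length : Int) ((g.map List.length).sum + 1) g 0

-- ===== PRECONDITION & SPEC =====

-- Pre_ admits every input with n ≤ 1 (A scans nothing and returns 0) and otherwise the genuine
-- m×n rectangular nonempty boards (m = number of rows, every row of length n): on mismatched or
-- ragged inputs with n ≥ 2, A's zip-truncation and its use of m as a per-column height bound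
-- yield accidental values or an IndexError.
def Pre_solution (m : Int) (n : Int) (board : List String) : Prop :=
  n ≤ 1 ∨ (board ≠ [] ∧ (board.length : Int) = m ∧ ∀ s ∈ board, (s.length : Int) = n)
instance (m : Int) (n : Int) (board : List String) : Decidable (Pre_solution m n board) := by
  unfold Pre_solution; infer_instance

def pvWitness_solution : Int × Int × List String := (2, 2, ["ab", "cd"])

def Spec_solution (m : Int) (n : Int) (board : List String) (out : Int) : Prop := out = solution_alt m n board
instance (m : Int) (n : Int) (board : List String) (out : Int) : Decidable (Spec_solution m n board out) := by unfold Spec_solution; infer_instance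

-- ===== CLAIM (what is proved, stated in full; the proofs are below) =====
def Claim_equal_solution : Prop := ∀ (m : Int) (n : Int) (board : List String), Dom_solution m n board → Pre_solution m n board → Spec_solution m n board (solution m n board)

-- ===== LEMMAS AND PROOFS =====

-- generic: membership through a foldl that only adds
theorem pv_mem_foldl_set {α β : Type} [BEq β] [LawfulBEq β]
    (l : List α) (f : PySem.Set β → α → PySem.Set β) (Q : α → β → Prop)
    (hf : ∀ t x y, y ∈ f t x ↔ y ∈ t ∨ Q x y) :
    ∀ (t0 : PySem.Set β) (y : β), (y ∈ l.foldl f t0 ↔ y ∈ t0 ∨ ∃ x ∈ l, Q x y) := by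
  induction l with
  | nil => simp
  | cons a l ih =>
    intro t0 y
    simp only [List.foldl_cons, ih, hf]
    constructor
    · rintro (( h | h) | ⟨x, hx, hQ⟩)
      · exact Or.inl h
      · exact Or.inr ⟨a, by simp, h⟩
      · exact Or.inr ⟨x, by simp [hx], hQ⟩
    · rintro (h | ⟨x, hx, hQ⟩)
      · exact Or.inl (Or.inl h)
      · rcases List.mem_cons.mp hx with rfl | hx
        · exact Or.inl (Or.inr hQ)
        · exact Or.inr ⟨x, hx, hQ⟩

theorem pv_nodup_foldl {α β : Type} (l : List α) (f : List β → α → List β)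
    (hf : ∀ t x, t.Nodup → (f t x).Nodup) (t0 : List β) (h0 : t0.Nodup) :
    (l.foldl f t0).Nodup :=
  List.foldlRecOn l f h0 (fun b hb a _ => hf b a hb)

-- bridges to Nat-indexed List operations
theorem pv_pyGetD_eq_getD {α : Type} (xs : List α) (i : Int) (d : α) (h0 : 0 ≤ i) :
    PySem.List.pyGetD xs i d = xs.getD i.toNat d := by
  simp [PySem.List.pyGetD, PySem.List.pyGet?_of_nonneg xs h0, List.getD_eq_getElem?_getD]

theorem pv_pySetD_eq_set {α : Type} (xs : List α) (i : Int) (v : α) (h0 : 0 ≤ i)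
    (h1 : i.toNat < xs.length) :
    PySem.List.pySetD xs i v = xs.set i.toNat v := by
  simp only [PySem.List.pySetD, PySem.List.pySet?, PySem.List.pyIdx?]
  rw [if_pos h0, if_pos (by omega : i < (xs.length : Int))]
  rfl

theorem pv_pySetD_noop {α : Type} (xs : List α) (i : Int) (v : α) (h0 : 0 ≤ i)
    (h1 : xs.length ≤ i.toNat) :
    PySem.List.pySetD xs i v = xs := by
  simp only [PySem.List.pySetD, PySem.List.pySet?, PySem.List.pyIdx?]
  rw [if_pos h0, if_neg (by omega)]
  rfl

-- the scan guard of A at column pair (i,i+1), levels (j,j+1), exactly as in the port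
def GA (cols : List (List Char)) (i j : Int) : Prop :=
  ((PySem.List.pyGetD cols i []).length : Int) > j + 1 ∧
  (((PySem.List.pyGetD cols (i+1) []).length : Int) > j + 1 ∧
   (PySem.List.pyGetD (PySem.List.pyGetD cols i []) j ' ' = PySem.List.pyGetD (PySem.List.pyGetD cols (i+1) []) j ' '
    ∧ PySem.List.pyGetD (PySem.List.pyGetD cols i []) j ' ' = PySem.List.pyGetD (PySem.List.pyGetD cols i []) (j+1) ' '
    ∧ PySem.List.pyGetD (PySem.List.pyGetD cols i []) j ' ' = PySem.List.pyGetD (PySem.List.pyGetD cols (i+1) []) (j+1) ' '))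

-- the scan guard of B at rows (r,r+1), columns (c,c+1), exactly as in the port
def GB (g : List (List (Option Char))) (r c : Int) : Prop :=
  PySem.List.pyGetD (PySem.List.pyGetD g r []) c none ≠ none ∧
  PySem.List.pyGetD (PySem.List.pyGetD g r []) c none = PySem.List.pyGetD (PySem.List.pyGetD g r []) (c+1) none ∧
  PySem.List.pyGetD (PySem.List.pyGetD g r []) c none = PySem.List.pyGetD (PySem.List.pyGetD g (r+1) []) c none ∧
  PySem.List.pyGetD (PySem.List.pyGetD g r []) c none = PySem.List.pyGetD (PySem.List.pyGetD g (r+1) []) (c+1) none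

theorem pv_mem_scanA (m n : Int) (cols : List (List Char)) (p : Int × Int) :
    p ∈ scanA m n cols ↔ ∃ i j : Int, (0 ≤ i ∧ i < n-1) ∧ (0 ≤ j ∧ j < m-1) ∧ GA cols i j ∧
      (p = (i,j) ∨ p = (i+1,j) ∨ p = (i,j+1) ∨ p = (i+1,j+1)) := by
  unfold scanA
  rw [pv_mem_foldl_set _ _
    (fun i y => ∃ j : Int, (0 ≤ j ∧ j < m-1) ∧ GA cols i j ∧
      (y = (i,j) ∨ y = (i+1,j) ∨ y = (i,j+1) ∨ y = (i+1,j+1)))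
    (fun t i y => by
      rw [pv_mem_foldl_set _ _
        (fun j y => GA cols i j ∧ (y = (i,j) ∨ y = (i+1,j) ∨ y = (i,j+1) ∨ y = (i+1,j+1)))
        (fun t j y => by
          unfold GA
          split_ifs with h1 h2 h3 <;> simp only [PySem.Set.mem_add] <;> tauto)]
      simp only [PySem.List.mem_pyRange_one])]
  simp only [PySem.List.mem_pyRange_one, PySem.Set.empty]
  constructor
  · rintro (h | ⟨i, hi, j, hj, hQ⟩)
    · cases h
    · exact ⟨i, j, hi, hj, hQ⟩
  · rintro ⟨i, j, hi, hj, hQ⟩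
    exact Or.inr ⟨i, hi, j, hj, hQ⟩

theorem pv_mem_scanB (n H : Int) (g : List (List (Option Char))) (q : Int × Int) :
    q ∈ scanB n H g ↔ ∃ r c : Int, (0 ≤ r ∧ r < H-1) ∧ (0 ≤ c ∧ c < n-1) ∧ GB g r c ∧
      (q = (r,c) ∨ q = (r,c+1) ∨ q = (r+1,c) ∨ q = (r+1,c+1)) := by
  unfold scanB
  rw [pv_mem_foldl_set _ _
    (fun r y => ∃ c : Int, (0 ≤ c ∧ c < n-1) ∧ GB g r c ∧
      (y = (r,c) ∨ y = (r,c+1) ∨ y = (r+1,c) ∨ y = (r+1,c+1)))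
    (fun t r y => by
      rw [pv_mem_foldl_set _ _
        (fun c y => GB g r c ∧ (y = (r,c) ∨ y = (r,c+1) ∨ y = (r+1,c) ∨ y = (r+1,c+1)))
        (fun t c y => by
          unfold GB
          dsimp only
          split_ifs with h1 <;>
            first
            | (simp only [PySem.Set.mem_update, List.mem_cons, List.not_mem_nil, or_false]; tauto)
            | tauto)]
      simp only [PySem.List.mem_pyRange_one])]
  simp only [PySem.List.mem_pyRange_one, PySem.Set.empty]
  constructor
  · rintro (h | ⟨r, hr, c, hc, hQ⟩)
    · cases h
    · exact ⟨r, c, hr, hc, hQ⟩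
  · rintro ⟨r, c, hr, hc, hQ⟩
    exact Or.inr ⟨r, hr, c, hc, hQ⟩

theorem pv_nodup_scanA (m n : Int) (cols : List (List Char)) : (scanA m n cols).Nodup := by
  unfold scanA
  apply pv_nodup_foldl
  · intro t i ht
    apply pv_nodup_foldl
    · intro t j ht
      split_ifs <;>
        first
        | exact ht
        | exact PySem.Set.nodup_add _ _ (PySem.Set.nodup_add _ _ (PySem.Set.nodup_add _ _ (PySem.Set.nodup_add _ _ ht)))
    · exact ht
  · exact List.nodup_nil

theorem pv_nodup_scanB (n H : Int) (g : List (List (Option Char))) : (scanB n H g).Nodup := by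
  unfold scanB
  apply pv_nodup_foldl
  · intro t r ht
    apply pv_nodup_foldl
    · intro t c ht
      dsimp only
      split_ifs
      · exact PySem.Set.nodup_update _ _ ht
      · exact ht
    · exact ht
  · exact List.nodup_nil

-- abstraction: the cell of the row-major grid at column c, row r (top-down), read off A's
-- bottom-first column list
def cellOf (cols : List (List Char)) (H c r : Nat) : Option Char := (cols.getD c [])[H-1-r]?

def rowsOf (H N : Nat) (cols : List (List Char)) : List (List (Option Char)) :=
  (List.range H).map (fun r => (List.range N).map (fun c => cellOf cols H c r))

def WFc (H N : Nat) (cols : List (List Char)) : Prop :=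
  cols.length = N ∧ ∀ col ∈ cols, col.length ≤ H

theorem pv_length_rowsOf (H N : Nat) (cols : List (List Char)) : (rowsOf H N cols).length = H := by
  simp [rowsOf]

theorem pv_row_rowsOf (H N : Nat) (cols : List (List Char)) (rn : Nat) (hr : rn < H) :
    (rowsOf H N cols).getD rn [] = (List.range N).map (fun c => cellOf cols H c rn) := by
  simp [rowsOf, List.getD_eq_getElem?_getD, hr]

theorem pv_cell_rowsOf (H N : Nat) (cols : List (List Char)) (r c : Int)
    (hr0 : 0 ≤ r) (hr1 : r < (H:Int)) (hc0 : 0 ≤ c) (hc1 : c < (N:Int)) :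
    PySem.List.pyGetD (PySem.List.pyGetD (rowsOf H N cols) r []) c none
      = cellOf cols H c.toNat r.toNat := by
  rw [pv_pyGetD_eq_getD _ _ _ hr0, pv_pyGetD_eq_getD _ _ _ hc0,
    pv_row_rowsOf H N cols r.toNat (by omega)]
  simp [List.getD_eq_getElem?_getD, (by omega : c.toNat < N)]


-- the 2x2 guard, normalised to Nat indices into the two adjacent bottom-first columns
def BlockN (L1 L2 : List Char) (jn : Nat) : Prop :=
  jn+1 < L1.length ∧ jn+1 < L2.length ∧
  L1.getD jn ' ' = L2.getD jn ' ' ∧ L1.getD jn ' ' = L1.getD (jn+1) ' ' ∧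
  L1.getD jn ' ' = L2.getD (jn+1) ' '

theorem pv_GA_iff (cols : List (List Char)) (i j : Int) (hi : 0 ≤ i) (hj : 0 ≤ j) :
    GA cols i j ↔ BlockN (cols.getD i.toNat []) (cols.getD (i.toNat+1) []) j.toNat := by
  unfold GA BlockN
  have hi1 : (i+1).toNat = i.toNat + 1 := by omega
  have hj1 : j + 1 = ((j.toNat + 1 : Nat) : Int) := by omega
  rw [pv_pyGetD_eq_getD cols i [] hi, pv_pyGetD_eq_getD cols (i+1) [] (by omega), hi1]
  set L1 := cols.getD i.toNat []
  set L2 := cols.getD (i.toNat+1) []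
  rw [pv_pyGetD_eq_getD L1 j ' ' hj, pv_pyGetD_eq_getD L2 j ' ' hj,
    pv_pyGetD_eq_getD L1 (j+1) ' ' (by omega), pv_pyGetD_eq_getD L2 (j+1) ' ' (by omega)]
  have hjt : (j+1).toNat = j.toNat + 1 := by omega
  rw [hjt]
  constructor
  · rintro ⟨h1, h2, h3⟩
    exact ⟨by omega, by omega, h3.1, h3.2.1, h3.2.2⟩
  · rintro ⟨h1, h2, h3, h4, h5⟩
    exact ⟨by omega, by omega, h3, h4, h5⟩

theorem pv_GB_iff (H N : Nat) (cols : List (List Char)) (r c : Int)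
    (hr0 : 0 ≤ r) (hr1 : r < (H:Int)-1) (hc0 : 0 ≤ c) (hc1 : c < (N:Int)-1) :
    GB (rowsOf H N cols) r c ↔
      (let L1 := cols.getD c.toNat []; let L2 := cols.getD (c.toNat+1) [];
       let jn := H - 2 - r.toNat;
       L1[jn+1]? ≠ none ∧ L1[jn+1]? = L2[jn+1]? ∧ L1[jn+1]? = L1[jn]? ∧ L1[jn+1]? = L2[jn]?) := by
  unfold GB
  rw [pv_cell_rowsOf H N cols r c hr0 (by omega) hc0 (by omega),
    pv_cell_rowsOf H N cols r (c+1) hr0 (by omega) (by omega) (by omega),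
    pv_cell_rowsOf H N cols (r+1) c (by omega) (by omega) hc0 (by omega),
    pv_cell_rowsOf H N cols (r+1) (c+1) (by omega) (by omega) (by omega) (by omega)]
  unfold cellOf
  have h1 : (c+1).toNat = c.toNat + 1 := by omega
  have h2 : (r+1).toNat = r.toNat + 1 := by omega
  have e1 : H - 1 - r.toNat = (H - 2 - r.toNat) + 1 := by omega
  have e2 : H - 1 - (r.toNat + 1) = H - 2 - r.toNat := by omega
  rw [h1, h2, e1, e2]

theorem pv_block_iff (L1 L2 : List Char) (jn : Nat) :
    (L1[jn+1]? ≠ none ∧ L1[jn+1]? = L2[jn+1]? ∧ L1[jn+1]? = L1[jn]? ∧ L1[jn+1]? = L2[jn]?)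
      ↔ BlockN L1 L2 jn := by
  unfold BlockN
  constructor
  · rintro ⟨h0, h1, h2, h3⟩
    obtain ⟨v, hv⟩ := Option.ne_none_iff_exists'.mp h0
    have l1 : jn+1 < L1.length := (List.getElem?_eq_some_iff.mp hv).1
    have l2 : jn+1 < L2.length := (List.getElem?_eq_some_iff.mp (h1 ▸ hv)).1
    have l1' : jn < L1.length := by omega
    have l2' : jn < L2.length := by omega
    simp only [List.getElem?_eq_getElem, l1, l2, l1', l2', Option.some.injEq] at h1 h2 h3
    refine ⟨l1, l2, ?_, ?_, ?_⟩ <;>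
      simp only [List.getD_eq_getElem?_getD, List.getElem?_eq_getElem, l1, l2, l1', l2',
        Option.getD_some]
    · rw [← h2, h3]
    · exact h2.symm
    · rw [← h2, h1]
  · rintro ⟨l1, l2, h3, h4, h5⟩
    have l1' : jn < L1.length := by omega
    have l2' : jn < L2.length := by omega
    simp only [List.getD_eq_getElem?_getD, List.getElem?_eq_getElem, l1, l2, l1', l2',
      Option.getD_some] at h3 h4 h5
    simp only [List.getElem?_eq_getElem, l1, l2, l1', l2', Option.some.injEq, ne_eq,
      reduceCtorEq, not_false_eq_true, true_and]
    exact ⟨by rw [← h4, h5], h4.symm, by rw [← h4, h3]⟩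

theorem pv_GB_iff_GA (H N : Nat) (cols : List (List Char)) (r c : Int)
    (hr0 : 0 ≤ r) (hr1 : r < (H:Int)-1) (hc0 : 0 ≤ c) (hc1 : c < (N:Int)-1) :
    GB (rowsOf H N cols) r c ↔ GA cols c ((H:Int)-2-r) := by
  rw [pv_GB_iff H N cols r c hr0 hr1 hc0 hc1,
    pv_GA_iff cols c ((H:Int)-2-r) hc0 (by omega)]
  have : ((H:Int)-2-r).toNat = H - 2 - r.toNat := by omega
  rw [this]
  exact pv_block_iff _ _ _

theorem pv_scan_corr (H N : Nat) (cols : List (List Char)) (q : Int × Int) :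
    q ∈ scanB (N:Int) (H:Int) (rowsOf H N cols) ↔
      ∃ p ∈ scanA (H:Int) (N:Int) cols, q = ((H:Int)-1-p.2, p.1) := by
  rw [pv_mem_scanB]
  constructor
  · rintro ⟨r, c, ⟨hr0, hr1⟩, ⟨hc0, hc1⟩, hGB, hcell⟩
    have hGA := (pv_GB_iff_GA H N cols r c hr0 hr1 hc0 hc1).mp hGB
    rcases hcell with rfl | rfl | rfl | rfl
    · refine ⟨(c, (H:Int)-2-r+1), (pv_mem_scanA _ _ _ _).mpr
        ⟨c, (H:Int)-2-r, ⟨hc0, hc1⟩, ⟨by omega, by omega⟩, hGA, by tauto⟩, ?_⟩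
      simp [Prod.ext_iff]; omega
    · refine ⟨(c+1, (H:Int)-2-r+1), (pv_mem_scanA _ _ _ _).mpr
        ⟨c, (H:Int)-2-r, ⟨hc0, hc1⟩, ⟨by omega, by omega⟩, hGA, by tauto⟩, ?_⟩
      simp [Prod.ext_iff]; omega
    · refine ⟨(c, (H:Int)-2-r), (pv_mem_scanA _ _ _ _).mpr
        ⟨c, (H:Int)-2-r, ⟨hc0, hc1⟩, ⟨by omega, by omega⟩, hGA, by tauto⟩, ?_⟩
      simp [Prod.ext_iff]; omega
    · refine ⟨(c+1, (H:Int)-2-r), (pv_mem_scanA _ _ _ _).mpr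
        ⟨c, (H:Int)-2-r, ⟨hc0, hc1⟩, ⟨by omega, by omega⟩, hGA, by tauto⟩, ?_⟩
      simp [Prod.ext_iff]; omega
  · rintro ⟨p, hpA, rfl⟩
    rw [pv_mem_scanA] at hpA
    obtain ⟨i, j, ⟨hi0, hi1⟩, ⟨hj0, hj1⟩, hGA, hcell⟩ := hpA
    have hj' : (H:Int)-2-((H:Int)-2-j) = j := by omega
    have hGA' : GA cols i ((H:Int)-2-((H:Int)-2-j)) := by rw [hj']; exact hGA
    have hGB := (pv_GB_iff_GA H N cols ((H:Int)-2-j) i (by omega) (by omega) hi0 hi1).mpr hGA'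
    rcases hcell with rfl | rfl | rfl | rfl <;>
      exact ⟨(H:Int)-2-j, i, ⟨by omega, by omega⟩, ⟨hi0, hi1⟩, hGB, by
        simp [Prod.ext_iff]; omega⟩

theorem pv_phi_inj (H : Nat) : Function.Injective (fun p : Int × Int => ((H:Int)-1-p.2, p.1)) := by
  rintro ⟨a1, a2⟩ ⟨b1, b2⟩ h
  simp only [Prod.mk.injEq] at h
  exact Prod.ext (by omega) (by omega)

theorem pv_scanB_perm (H N : Nat) (cols : List (List Char)) :
    (scanB (N:Int) (H:Int) (rowsOf H N cols)).Perm
      ((scanA (H:Int) (N:Int) cols).map (fun p => ((H:Int)-1-p.2, p.1))) := by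
  rw [List.perm_ext_iff_of_nodup (pv_nodup_scanB _ _ _)
    ((pv_nodup_scanA _ _ _).map (pv_phi_inj H))]
  intro q
  rw [pv_scan_corr, List.mem_map]
  constructor
  · rintro ⟨p, hp, rfl⟩; exact ⟨p, hp, rfl⟩
  · rintro ⟨p, hp, rfl⟩; exact ⟨p, hp, rfl⟩

theorem pv_scan_len (H N : Nat) (cols : List (List Char)) :
    (scanB (N:Int) (H:Int) (rowsOf H N cols)).length = (scanA (H:Int) (N:Int) cols).length := by
  rw [(pv_scanB_perm H N cols).length_eq, List.length_map]

theorem pv_scan_empty (H N : Nat) (cols : List (List Char)) :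
    (scanB (N:Int) (H:Int) (rowsOf H N cols) = [] ↔ scanA (H:Int) (N:Int) cols = []) := by
  constructor <;> intro h
  · have := (pv_scanB_perm H N cols).length_eq
    rw [h] at this
    simpa using (List.eq_nil_of_length_eq_zero (by simpa using this.symm))
  · have := (pv_scanB_perm H N cols).length_eq
    rw [h] at this
    simpa using (List.eq_nil_of_length_eq_zero (by simpa using this))

-- keep the entries of a bottom-first column whose level satisfies K, in order
def keepL (col : List Char) (K : Nat → Bool) : List Char :=
  ((List.range col.length).filter K).map (fun k => col.getD k ' ')

theorem pv_keepL_true (col : List Char) (K : Nat → Bool) (hK : ∀ k, k < col.length → K k = true) :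
    keepL col K = col := by
  unfold keepL
  rw [List.filter_eq_self.mpr (by intro k hk; exact hK k (List.mem_range.mp hk))]
  apply List.ext_getElem
  · simp
  · intro i h1 h2
    simp [List.getD_eq_getElem?_getD, (by simpa using h1 : i < col.length)]

theorem pv_keepL_length_le (col : List Char) (K : Nat → Bool) : (keepL col K).length ≤ col.length := by
  unfold keepL
  rw [List.length_map]
  exact le_trans (List.length_filter_le _ _) (by rw [List.length_range])

theorem pv_keep_erase (col : List Char) (j : Nat) (P : Nat → Bool)
    (hP : ∀ k, j ≤ k → P k = true) :
    keepL (col.eraseIdx j) P = keepL col (fun k => P k && !(k == j)) := by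
  by_cases hj : j < col.length
  · unfold keepL
    have hlen : (col.eraseIdx j).length = col.length - 1 := List.length_eraseIdx_of_lt hj
    have e1 : List.range (col.length - 1) = List.range j ++ (List.range (col.length - 1 - j)).map (fun x => j + x) := by
      rw [← List.range_add]
      congr 1
      omega
    have e2 : List.range col.length = (List.range j ++ [j]) ++ (List.range (col.length - 1 - j)).map (fun x => (j+1) + x) := by
      rw [← List.range_succ, ← List.range_add]
      congr 1
      omega
    rw [hlen, e1, e2, List.filter_append, List.filter_append, List.filter_append,
      List.map_append, List.map_append, List.map_append]
    have pieceB : List.filter (fun k => P k && !(k == j)) [j] = [] := by simp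
    rw [pieceB]
    simp only [List.map_nil, List.append_nil]
    congr 1
    · have hA : List.filter (fun k => P k && !(k == j)) (List.range j) = List.filter P (List.range j) :=
        List.filter_congr (fun k hk => by
          have hkj : k < j := List.mem_range.mp hk
          simp [Nat.ne_of_lt hkj])
      rw [hA]
      apply List.map_congr_left
      intro k hk
      have hkj : k < j := List.mem_range.mp (List.mem_filter.mp hk).1
      simp [List.getD_eq_getElem?_getD, List.getElem?_eraseIdx, hkj]
    · have hC1 : List.filter P ((List.range (col.length - 1 - j)).map (fun x => j + x))
          = (List.range (col.length - 1 - j)).map (fun x => j + x) :=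
        List.filter_eq_self.mpr (fun k hk => by
          obtain ⟨t, _, rfl⟩ := List.mem_map.mp hk
          exact hP _ (by omega))
      have hC2 : List.filter (fun k => P k && !(k == j)) ((List.range (col.length - 1 - j)).map (fun x => j + 1 + x))
          = (List.range (col.length - 1 - j)).map (fun x => j + 1 + x) :=
        List.filter_eq_self.mpr (fun k hk => by
          obtain ⟨t, _, rfl⟩ := List.mem_map.mp hk
          have h1 := hP (j+1+t) (by omega)
          simp [h1]
          omega)
      rw [hC1, hC2]
      rw [List.map_map, List.map_map]
      apply List.map_congr_left
      intro k _
      simp only [Function.comp_apply]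
      rw [List.getD_eq_getElem?_getD, List.getD_eq_getElem?_getD, List.getElem?_eraseIdx,
        if_neg (by omega : ¬ (j + k < j))]
      congr 2
      omega
  · rw [List.eraseIdx_of_length_le (by omega)]
    unfold keepL
    have hA : List.filter P (List.range col.length)
        = List.filter (fun k => P k && !(k == j)) (List.range col.length) :=
      (List.filter_congr (fun k hk => by
        have hk' : k < col.length := List.mem_range.mp hk
        simp
        intro _
        omega))
    rw [hA]

theorem pv_delete_desc (js : List Nat) (hdesc : js.Pairwise (fun a b => b < a)) :
    ∀ col : List Char, js.foldl (fun c j => c.eraseIdx j) col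
      = keepL col (fun k => !js.contains k) := by
  induction js with
  | nil =>
    intro col
    simp only [List.foldl_nil]
    exact (pv_keepL_true col _ (by simp)).symm
  | cons j js ih =>
    intro col
    have hlt : ∀ x ∈ js, x < j := fun x hx => (List.pairwise_cons.mp hdesc).1 x hx
    rw [List.foldl_cons, ih (List.pairwise_cons.mp hdesc).2,
      pv_keep_erase _ j _ (by
        intro k hk
        simp only [Bool.not_eq_true', List.contains_eq_mem, decide_eq_false_iff_not]
        intro hmem
        exact absurd (hlt k hmem) (by omega))]
    unfold keepL
    congr 1
    apply List.filter_congr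
    intro k _
    by_cases h1 : k ∈ js <;> by_cases h2 : k = j <;> simp [h1, h2]

theorem pv_length_removeA (l : List (Int × Int)) :
    ∀ cols : List (List Char), (removeA l cols).length = cols.length := by
  induction l with
  | nil => intro cols; rfl
  | cons p rest ih =>
    intro cols
    have hstep : removeA (p :: rest) cols = removeA rest
        (PySem.List.pySetD cols p.1
          (PySem.List.slice (PySem.List.pyGetD cols p.1 []) none (some p.2) ++
           PySem.List.slice (PySem.List.pyGetD cols p.1 []) (some (p.2+1)) none)) := rfl
    rw [hstep, ih, PySem.List.length_pySetD]

theorem pv_set_getD_self (cols : List (List Char)) (c : Nat) (v : List Char) (hc : c < cols.length) :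
    (cols.set c v).getD c [] = v := by
  rw [List.getD_eq_getElem?_getD, List.getElem?_set_self (by simpa using hc), Option.getD_some]

theorem pv_set_getD_ne (cols : List (List Char)) (i c : Nat) (v : List Char) (h : i ≠ c) :
    (cols.set i v).getD c [] = cols.getD c [] := by
  rw [List.getD_eq_getElem?_getD, List.getD_eq_getElem?_getD, List.getElem?_set_ne (by omega)]

theorem pv_removeA_col (l : List (Int × Int)) (hl : ∀ p ∈ l, 0 ≤ p.1) :
    ∀ (cols : List (List Char)) (c : Nat), c < cols.length →
    (removeA l cols).getD c [] =
      ((l.filter (fun p => p.1 == (c:Int))).map (fun p => p.2)).foldl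
        (fun col j => PySem.List.slice col none (some j) ++ PySem.List.slice col (some (j+1)) none)
        (cols.getD c []) := by
  induction l with
  | nil => intro cols c hc; simp [removeA]
  | cons p rest ih =>
    intro cols c hc
    have hp0 : 0 ≤ p.1 := hl p (by simp)
    have hrest : ∀ q ∈ rest, 0 ≤ q.1 := fun q hq => hl q (by simp [hq])
    have hstep : removeA (p :: rest) cols = removeA rest
        (PySem.List.pySetD cols p.1
          (PySem.List.slice (PySem.List.pyGetD cols p.1 []) none (some p.2) ++
           PySem.List.slice (PySem.List.pyGetD cols p.1 []) (some (p.2+1)) none)) := rfl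
    rw [hstep]
    by_cases hpc : p.1 = (c:Int)
    · have htn : p.1.toNat = c := by omega
      have hset : PySem.List.pySetD cols p.1
          (PySem.List.slice (PySem.List.pyGetD cols p.1 []) none (some p.2) ++
           PySem.List.slice (PySem.List.pyGetD cols p.1 []) (some (p.2+1)) none)
          = cols.set c (PySem.List.slice (cols.getD c []) none (some p.2) ++
              PySem.List.slice (cols.getD c []) (some (p.2+1)) none) := by
        rw [pv_pyGetD_eq_getD cols p.1 [] hp0, htn,
          pv_pySetD_eq_set _ _ _ hp0 (by rw [htn]; exact hc), htn]
      rw [hset, ih hrest _ c (by rw [List.length_set]; exact hc),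
        pv_set_getD_self _ _ _ hc]
      have hfil : List.filter (fun q => q.1 == (c:Int)) (p :: rest)
          = p :: List.filter (fun q => q.1 == (c:Int)) rest := by
        rw [List.filter_cons_of_pos (by simp [hpc])]
      rw [hfil, List.map_cons, List.foldl_cons]
    · have hcols : (PySem.List.pySetD cols p.1
          (PySem.List.slice (PySem.List.pyGetD cols p.1 []) none (some p.2) ++
           PySem.List.slice (PySem.List.pyGetD cols p.1 []) (some (p.2+1)) none)).getD c []
          = cols.getD c [] := by
        by_cases hin : p.1.toNat < cols.length
        · rw [pv_pySetD_eq_set _ _ _ hp0 hin, pv_set_getD_ne _ _ _ _ (by omega)]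
        · rw [pv_pySetD_noop _ _ _ hp0 (by omega)]
      have hlen : (PySem.List.pySetD cols p.1
          (PySem.List.slice (PySem.List.pyGetD cols p.1 []) none (some p.2) ++
           PySem.List.slice (PySem.List.pyGetD cols p.1 []) (some (p.2+1)) none)).length
          = cols.length := PySem.List.length_pySetD _ _ _
      rw [ih hrest _ c (by rw [hlen]; exact hc), hcols,
        List.filter_cons_of_neg (by simp [hpc])]

theorem pv_colfold_eraseIdx (js : List Int) :
    ∀ col : List Char, (∀ j ∈ js, 0 ≤ j) →
      js.foldl (fun col j => PySem.List.slice col none (some j) ++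
        PySem.List.slice col (some (j+1)) none) col
      = (js.map Int.toNat).foldl (fun c j => c.eraseIdx j) col := by
  induction js with
  | nil => intro col _; rfl
  | cons j js ih =>
    intro col hj
    have hj0 : 0 ≤ j := hj j (by simp)
    rw [List.map_cons, List.foldl_cons, List.foldl_cons,
      PySem.List.slice_to col hj0, PySem.List.slice_from col (by omega : (0:Int) ≤ j + 1)]
    have : (j+1).toNat = j.toNat + 1 := by omega
    rw [this, ← List.eraseIdx_eq_take_drop_succ]
    exact ih _ (fun q hq => hj q (by simp [hq]))

-- every cell recorded by A's scan lies inside its (current) column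
theorem pv_temp_bounds (m n : Int) (cols : List (List Char)) (p : Int × Int)
    (hp : p ∈ scanA m n cols) :
    0 ≤ p.1 ∧ 0 ≤ p.2 ∧ p.2 < ((cols.getD p.1.toNat []).length : Int) := by
  rw [pv_mem_scanA] at hp
  obtain ⟨i, j, ⟨hi0, hi1⟩, ⟨hj0, hj1⟩, hGA, hcell⟩ := hp
  obtain ⟨g1, g2, -⟩ := hGA
  rw [pv_pyGetD_eq_getD cols i [] hi0] at g1
  rw [pv_pyGetD_eq_getD cols (i+1) [] (by omega)] at g2
  have hit : (i+1).toNat = i.toNat + 1 := by omega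
  rw [hit] at g2
  rcases hcell with rfl | rfl | rfl | rfl <;> dsimp only
  · exact ⟨hi0, hj0, by omega⟩
  · refine ⟨by omega, hj0, ?_⟩
    rw [(by omega : (i+1).toNat = i.toNat + 1)]
    omega
  · exact ⟨hi0, by omega, by omega⟩
  · refine ⟨by omega, by omega, ?_⟩
    rw [(by omega : (i+1).toNat = i.toNat + 1)]
    omega

theorem pv_newcols_col (H N : Nat) (cols : List (List Char)) (hlen : cols.length = N)
    (c : Nat) (hc : c < N) :
    (removeA (PySem.List.sorted (scanA (H:Int) (N:Int) cols) (fun p => p.2) true) cols).getD c []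
      = keepL (cols.getD c [])
          (fun k => decide (((c:Int),(k:Int)) ∉ scanA (H:Int) (N:Int) cols)) := by
  set temp := scanA (H:Int) (N:Int) cols with htemp
  set st := PySem.List.sorted temp (fun p => p.2) true with hst
  have hmemst : ∀ p ∈ st, p ∈ temp := fun p hp => (PySem.List.mem_sorted _ _ _ _).mp hp
  have hl : ∀ p ∈ st, 0 ≤ p.1 := fun p hp => (pv_temp_bounds _ _ _ p (hmemst p hp)).1
  rw [pv_removeA_col st hl cols c (by omega)]
  set js := (st.filter (fun p => p.1 == (c:Int))).map (fun p => p.2) with hjs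
  have hjmem : ∀ j ∈ js, ∃ p ∈ st, p.1 = (c:Int) ∧ p.2 = j := by
    intro j hj
    obtain ⟨p, hp, rfl⟩ := List.mem_map.mp hj
    have := List.mem_filter.mp hp
    exact ⟨p, this.1, by simpa using this.2, rfl⟩
  have hjs0 : ∀ j ∈ js, 0 ≤ j := by
    intro j hj
    obtain ⟨p, hp, _, rfl⟩ := hjmem j hj
    exact (pv_temp_bounds _ _ _ p (hmemst p hp)).2.1
  rw [pv_colfold_eraseIdx js _ hjs0]
  have hnd_st : st.Nodup := ((PySem.List.sorted_perm temp (fun p => p.2) true).nodup_iff).mpr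
    (pv_nodup_scanA _ _ _)
  have hpw : js.Pairwise (fun a b => b ≤ a) :=
    List.pairwise_map.mpr ((PySem.List.sorted_pairwise_rev temp (fun p => p.2)).filter _)
  have hnd_js : js.Nodup := by
    apply List.Nodup.map_on ?_ (hnd_st.filter _)
    intro x hx y hy hxy
    have hx1 : x.1 = (c:Int) := by simpa using (List.mem_filter.mp hx).2
    have hy1 : y.1 = (c:Int) := by simpa using (List.mem_filter.mp hy).2
    exact Prod.ext (hx1.trans hy1.symm) hxy
  have hstrict : js.Pairwise (fun a b => b < a) :=
    (hpw.and hnd_js).imp (fun h => lt_of_le_of_ne h.1 (fun he => h.2 he.symm))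
  have hdesc : (js.map Int.toNat).Pairwise (fun a b => b < a) := by
    rw [List.pairwise_map]
    apply hstrict.imp_of_mem
    intro a b ha hb h
    have := hjs0 b hb
    omega
  rw [pv_delete_desc _ hdesc]
  unfold keepL
  congr 1
  apply List.filter_congr
  intro k _
  have hiff : k ∈ js.map Int.toNat ↔ ((c:Int),(k:Int)) ∈ temp := by
    constructor
    · intro hk
      obtain ⟨j, hj, rfl⟩ := List.mem_map.mp hk
      obtain ⟨p, hp, hp1, hp2⟩ := hjmem j hj
      have h0 := hjs0 j hj
      have : p = ((c:Int), ((j.toNat : Nat):Int)) := Prod.ext hp1 (by omega)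
      rw [← this]
      exact hmemst p hp
    · intro hk
      have hkst : ((c:Int),(k:Int)) ∈ st := (PySem.List.mem_sorted _ _ _ _).mpr hk
      have : ((c:Int),(k:Int)) ∈ st.filter (fun p => p.1 == (c:Int)) :=
        List.mem_filter.mpr ⟨hkst, by simp⟩
      have hmem : ((k:Int)) ∈ js := List.mem_map.mpr ⟨_, this, rfl⟩
      exact List.mem_map.mpr ⟨(k:Int), hmem, by omega⟩
  by_cases hmem : ((c:Int),(k:Int)) ∈ temp
  · simp [List.contains_eq_mem, hiff.mpr hmem, hmem]
  · have : ¬ k ∈ js.map Int.toNat := fun h => hmem (hiff.mp h)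
    simp [List.contains_eq_mem, this, hmem]

theorem pv_newcols_WF (H N : Nat) (cols : List (List Char)) (hWF : WFc H N cols) :
    WFc H N (removeA (PySem.List.sorted (scanA (H:Int) (N:Int) cols) (fun p => p.2) true) cols) := by
  obtain ⟨hlen, hcols⟩ := hWF
  constructor
  · rw [pv_length_removeA, hlen]
  · intro col hcol
    obtain ⟨c, hc, rfl⟩ := List.mem_iff_getElem.mp hcol
    have hc' : c < N := by
      have := pv_length_removeA (PySem.List.sorted (scanA (H:Int) (N:Int) cols) (fun p => p.2) true) cols
      omega
    have hgetD : (removeA (PySem.List.sorted (scanA (H:Int) (N:Int) cols) (fun p => p.2) true) cols)[c]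
        = (removeA (PySem.List.sorted (scanA (H:Int) (N:Int) cols) (fun p => p.2) true) cols).getD c [] := by
      rw [List.getD_eq_getElem?_getD, List.getElem?_eq_getElem hc]
      rfl
    rw [hgetD, pv_newcols_col H N cols hlen c hc']
    calc (keepL (cols.getD c []) _).length ≤ (cols.getD c []).length := pv_keepL_length_le _ _
      _ ≤ H := by
        have h : c < cols.length := by omega
        have he : cols.getD c [] = cols[c] := by
          rw [List.getD_eq_getElem?_getD, List.getElem?_eq_getElem h]
          rfl
        rw [he]
        exact hcols _ (List.getElem_mem _)

theorem pv_set_getD_self' (g : List (List (Option Char))) (i : Nat) (v : List (Option Char))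
    (hi : i < g.length) : (g.set i v).getD i [] = v := by
  rw [List.getD_eq_getElem?_getD, List.getElem?_set_self (by simpa using hi), Option.getD_some]

theorem pv_set_getD_ne' (g : List (List (Option Char))) (i k : Nat) (v : List (Option Char))
    (h : i ≠ k) : (g.set i v).getD k [] = g.getD k [] := by
  rw [List.getD_eq_getElem?_getD, List.getD_eq_getElem?_getD, List.getElem?_set_ne (by omega)]

theorem pv_set_getD_self'' (row : List (Option Char)) (i : Nat) (v : Option Char)
    (hi : i < row.length) : (row.set i v).getD i none = v := by
  rw [List.getD_eq_getElem?_getD, List.getElem?_set_self (by simpa using hi), Option.getD_some]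

theorem pv_set_getD_ne'' (row : List (Option Char)) (i k : Nat) (v : Option Char)
    (h : i ≠ k) : (row.set i v).getD k none = row.getD k none := by
  rw [List.getD_eq_getElem?_getD, List.getD_eq_getElem?_getD, List.getElem?_set_ne (by omega)]

theorem pv_markB_length (l : List (Int × Int)) :
    ∀ g : List (List (Option Char)), (markB l g).length = g.length := by
  induction l with
  | nil => intro g; rfl
  | cons p rest ih =>
    intro g
    have hstep : markB (p :: rest) g = markB rest
        (PySem.List.pySetD g p.1 (PySem.List.pySetD (PySem.List.pyGetD g p.1 []) p.2 none)) := rfl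
    rw [hstep, ih, PySem.List.length_pySetD]

theorem pv_markB_rowlen (l : List (Int × Int)) (hl : ∀ p ∈ l, 0 ≤ p.1) :
    ∀ (g : List (List (Option Char))) (rn : Nat),
      ((markB l g).getD rn []).length = (g.getD rn []).length := by
  induction l with
  | nil => intro g rn; rfl
  | cons p rest ih =>
    intro g rn
    have hp0 : 0 ≤ p.1 := hl p (by simp)
    have hstep : markB (p :: rest) g = markB rest
        (PySem.List.pySetD g p.1 (PySem.List.pySetD (PySem.List.pyGetD g p.1 []) p.2 none)) := rfl
    rw [hstep, ih (fun q hq => hl q (by simp [hq]))]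
    by_cases hin : p.1.toNat < g.length
    · rw [pv_pySetD_eq_set _ _ _ hp0 hin]
      by_cases heq : p.1.toNat = rn
      · subst heq
        rw [pv_set_getD_self' _ _ _ hin, pv_pyGetD_eq_getD _ _ _ hp0,
          PySem.List.length_pySetD]
      · rw [pv_set_getD_ne' _ _ _ _ heq]
    · rw [pv_pySetD_noop _ _ _ hp0 (by omega)]

theorem pv_markB_cell (l : List (Int × Int)) (hl : ∀ p ∈ l, 0 ≤ p.1 ∧ 0 ≤ p.2) :
    ∀ (g : List (List (Option Char))) (rn cn : Nat), rn < g.length → cn < (g.getD rn []).length →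
      ((markB l g).getD rn []).getD cn none
        = if ((rn:Int),(cn:Int)) ∈ l then none else (g.getD rn []).getD cn none := by
  induction l with
  | nil => intro g rn cn _ _; simp [markB]
  | cons p rest ih =>
    intro g rn cn hrn hcn
    obtain ⟨hp1, hp2⟩ := hl p (by simp)
    have hrest : ∀ q ∈ rest, 0 ≤ q.1 ∧ 0 ≤ q.2 := fun q hq => hl q (by simp [hq])
    have hstep : markB (p :: rest) g = markB rest
        (PySem.List.pySetD g p.1 (PySem.List.pySetD (PySem.List.pyGetD g p.1 []) p.2 none)) := rfl
    set g' := PySem.List.pySetD g p.1 (PySem.List.pySetD (PySem.List.pyGetD g p.1 []) p.2 none) with hg'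
    have hlen' : g'.length = g.length := PySem.List.length_pySetD _ _ _
    have hrow' : ∀ k, (g'.getD k []).length = (g.getD k []).length := by
      intro k
      rw [hg']
      by_cases hin : p.1.toNat < g.length
      · rw [pv_pySetD_eq_set _ _ _ hp1 hin]
        by_cases heq : p.1.toNat = k
        · subst heq
          rw [pv_set_getD_self' _ _ _ hin, pv_pyGetD_eq_getD _ _ _ hp1,
            PySem.List.length_pySetD]
        · rw [pv_set_getD_ne' _ _ _ _ heq]
      · rw [pv_pySetD_noop _ _ _ hp1 (by omega)]
    rw [hstep, ih hrest g' rn cn (by omega) (by rw [hrow']; exact hcn)]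
    by_cases hmem : ((rn:Int),(cn:Int)) ∈ rest
    · rw [if_pos hmem, if_pos (by simp [hmem])]
    · rw [if_neg hmem]
      by_cases hpeq : p = ((rn:Int),(cn:Int))
      · rw [if_pos (by simp [hpeq])]
        subst hpeq
        rw [hg']
        dsimp only
        have h1 : ((rn:Int)).toNat = rn := by omega
        have h2 : ((cn:Int)).toNat = cn := by omega
        rw [pv_pySetD_eq_set _ _ _ (by omega) (by omega : ((rn:Int)).toNat < g.length), h1,
          pv_set_getD_self' _ _ _ hrn, pv_pyGetD_eq_getD _ _ _ (by omega), h1,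
          pv_pySetD_eq_set _ _ _ (by omega) (by omega : ((cn:Int)).toNat < (g.getD rn []).length), h2,
          pv_set_getD_self'' _ _ _ hcn]
      · rw [if_neg (by
          simp only [List.mem_cons]
          rintro (h | h)
          · exact hpeq h.symm
          · exact hmem h)]
        rw [hg']
        by_cases hin : p.1.toNat < g.length
        · rw [pv_pySetD_eq_set _ _ _ hp1 hin]
          by_cases heq : p.1.toNat = rn
          · rw [heq, pv_set_getD_self' _ _ _ hrn]
            rw [pv_pyGetD_eq_getD _ _ _ hp1, heq]
            by_cases hceq : p.2.toNat = cn
            · exfalso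
              apply hpeq
              apply Prod.ext <;> dsimp <;> omega
            · by_cases hcin : p.2.toNat < (g.getD rn []).length
              · rw [pv_pySetD_eq_set _ _ _ hp2 hcin, pv_set_getD_ne'' _ _ _ _ hceq]
              · rw [pv_pySetD_noop _ _ _ hp2 (by omega)]
          · rw [pv_set_getD_ne' _ _ _ _ heq]
        · rw [pv_pySetD_noop _ _ _ hp1 (by omega)]

-- the survivors of column cn of g, read top-down
def survOf (g : List (List (Option Char))) (H cn : Nat) : List (Option Char) :=
  ((List.range H).map (fun rn => (g.getD rn []).getD cn none)).filter (fun v => decide (v ≠ none))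

-- the column written back by gravity, padded with none at the top
def paddedD (g : List (List (Option Char))) (H cn rn : Nat) : Option Char :=
  (List.replicate (H - (survOf g H cn).length) (none : Option Char) ++ survOf g H cn).getD rn none

theorem pv_surv_fold (g : List (List (Option Char))) (H : Nat) (c : Int) (hc : 0 ≤ c) :
    (PySem.List.pyRange 0 (H:Int) 1).foldl (fun acc r =>
        if PySem.List.pyGetD (PySem.List.pyGetD g r []) c none ≠ none then
          acc ++ [PySem.List.pyGetD (PySem.List.pyGetD g r []) c none]
        else acc) []
      = survOf g H c.toNat := by
  have hval : ∀ rn : Nat, PySem.List.pyGetD (PySem.List.pyGetD g ((rn:Nat):Int) []) c none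
      = (g.getD rn []).getD c.toNat none := fun rn => by
    rw [PySem.List.pyGetD_natCast, pv_pyGetD_eq_getD _ _ _ hc]
  rw [PySem.List.pyRange_zero_natCast, List.foldl_map]
  simp only [hval]
  rw [← List.foldl_map (f := fun rn : Nat => (g.getD rn []).getD c.toNat none)
    (g := fun acc (x : Option Char) => if x ≠ none then acc ++ [x] else acc),
    PySem.List.foldl_append_ite_eq_filter, List.nil_append]
  rfl

theorem pv_rowset_getD (row : List (Option Char)) (c : Int) (hc0 : 0 ≤ c) (v : Option Char)
    (cn : Nat) : (PySem.List.pySetD row c v).getD cn none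
      = if c.toNat = cn ∧ c.toNat < row.length then v else row.getD cn none := by
  by_cases hin : c.toNat < row.length
  · rw [pv_pySetD_eq_set _ _ _ hc0 hin]
    by_cases heq : c.toNat = cn
    · rw [if_pos ⟨heq, hin⟩, heq, pv_set_getD_self'' _ _ _ (heq ▸ hin)]
    · rw [if_neg (fun h => heq h.1), pv_set_getD_ne'' _ _ _ _ heq]
  · rw [pv_pySetD_noop _ _ _ hc0 (by omega), if_neg (fun h => hin h.2)]

theorem pv_writecol (c : Int) (hc0 : 0 ≤ c) (colv : List (Option Char)) :
    ∀ (rs : List Nat), rs.Nodup → ∀ g : List (List (Option Char)),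
      ((rs.foldl (fun g (rn : Nat) => PySem.List.pySetD g (rn:Int)
          (PySem.List.pySetD (PySem.List.pyGetD g (rn:Int) []) c
            (PySem.List.pyGetD colv (rn:Int) none))) g).length = g.length)
      ∧ ∀ rn : Nat, (rs.foldl (fun g (rn : Nat) => PySem.List.pySetD g (rn:Int)
          (PySem.List.pySetD (PySem.List.pyGetD g (rn:Int) []) c
            (PySem.List.pyGetD colv (rn:Int) none))) g).getD rn []
          = if rn ∈ rs ∧ rn < g.length
            then PySem.List.pySetD (g.getD rn []) c (PySem.List.pyGetD colv (rn:Int) none)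
            else g.getD rn [] := by
  intro rs
  induction rs with
  | nil =>
    intro _ g
    exact ⟨rfl, fun rn => by simp⟩
  | cons r rest ih =>
    intro hnd g
    have hndr := (List.nodup_cons.mp hnd).2
    have hrni : r ∉ rest := (List.nodup_cons.mp hnd).1
    set g₁ := PySem.List.pySetD g (r:Int)
      (PySem.List.pySetD (PySem.List.pyGetD g (r:Int) []) c
        (PySem.List.pyGetD colv (r:Int) none)) with hg₁
    have hlen₁ : g₁.length = g.length := PySem.List.length_pySetD _ _ _
    have hrow₁ : ∀ k : Nat, g₁.getD k []
        = if r = k ∧ r < g.length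
          then PySem.List.pySetD (g.getD r []) c (PySem.List.pyGetD colv (r:Int) none)
          else g.getD k [] := by
      intro k
      rw [hg₁]
      have h0 : ((r:Nat):Int).toNat = r := by omega
      by_cases hin : r < g.length
      · rw [pv_pySetD_eq_set _ _ _ (by omega) (by omega : ((r:Nat):Int).toNat < g.length), h0]
        by_cases heq : r = k
        · subst heq
          rw [pv_set_getD_self' _ _ _ hin, if_pos ⟨rfl, hin⟩, PySem.List.pyGetD_natCast]
        · rw [pv_set_getD_ne' _ _ _ _ heq, if_neg (fun h => heq h.1)]
      · rw [pv_pySetD_noop _ _ _ (by omega) (by omega), if_neg (fun h => hin h.2)]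
    rw [List.foldl_cons]
    refine ⟨?_, ?_⟩
    · rw [(ih hndr g₁).1, hlen₁]
    · intro rn
      rw [(ih hndr g₁).2 rn, hlen₁]
      by_cases hmem : rn ∈ rest
      · have hne : r ≠ rn := fun he => hrni (he ▸ hmem)
        by_cases hlt : rn < g.length
        · rw [if_pos ⟨hmem, hlt⟩, if_pos ⟨by simp [hmem], hlt⟩, hrow₁ rn,
            if_neg (fun h => hne h.1)]
        · rw [if_neg (fun h => hlt h.2), if_neg (fun h => hlt h.2), hrow₁ rn,
            if_neg (fun h => hne h.1)]
      · rw [if_neg (fun h => hmem h.1), hrow₁ rn]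
        by_cases her : r = rn
        · subst her
          by_cases hlt : r < g.length
          · rw [if_pos ⟨rfl, hlt⟩, if_pos ⟨by simp, hlt⟩]
          · rw [if_neg (fun h => hlt h.2), if_neg (fun h => hlt h.2)]
        · rw [if_neg (fun h => her h.1), if_neg (fun h => by
            rcases List.mem_cons.mp h.1 with he | he
            · exact her he.symm
            · exact hmem he)]

-- proof-side name for the loop body of gravityB (one column; the lets zeta-reduced)
def gstep (H : Nat) (g : List (List (Option Char))) (c : Int) : List (List (Option Char)) :=
  (PySem.List.pyRange 0 (H:Int) 1).foldl (fun g' r =>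
    PySem.List.pySetD g' r (PySem.List.pySetD (PySem.List.pyGetD g' r []) c
      (PySem.List.pyGetD
        (List.replicate ((H:Int).toNat - ((PySem.List.pyRange 0 (H:Int) 1).foldl (fun acc r' =>
            if PySem.List.pyGetD (PySem.List.pyGetD g r' []) c none ≠ none then
              acc ++ [PySem.List.pyGetD (PySem.List.pyGetD g r' []) c none] else acc) []).length)
            (none : Option Char) ++
          (PySem.List.pyRange 0 (H:Int) 1).foldl (fun acc r' =>
            if PySem.List.pyGetD (PySem.List.pyGetD g r' []) c none ≠ none then
              acc ++ [PySem.List.pyGetD (PySem.List.pyGetD g r' []) c none] else acc) [])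
        r none))) g

theorem pv_gravityB_eq (H N : Nat) (g : List (List (Option Char))) :
    gravityB (N:Int) (H:Int) g = (List.range N).foldl (fun g (cn : Nat) => gstep H g (cn:Int)) g := by
  unfold gravityB
  rw [PySem.List.pyRange_zero_natCast N, List.foldl_map]
  rfl

theorem pv_gstep_spec (H : Nat) (g : List (List (Option Char))) (c : Int) (hc : 0 ≤ c) :
    (gstep H g c).length = g.length ∧
    ∀ rn : Nat, (gstep H g c).getD rn []
      = if rn ∈ List.range H ∧ rn < g.length
        then PySem.List.pySetD (g.getD rn []) c
          (PySem.List.pyGetD (List.replicate (H - (survOf g H c.toNat).length)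
            (none : Option Char) ++ survOf g H c.toNat) (rn:Int) none)
        else g.getD rn [] := by
  unfold gstep
  rw [pv_surv_fold g H c hc]
  rw [(by omega : ((H:Nat):Int).toNat = H)]
  rw [PySem.List.pyRange_zero_natCast, List.foldl_map]
  exact pv_writecol c hc _ (List.range H) (List.nodup_range) g

theorem pv_surv_congr (H N : Nat) (g g₁ : List (List (Option Char))) (cn : Nat)
    (h : ∀ rn, rn < H → (g.getD rn []).getD cn none = (g₁.getD rn []).getD cn none) :
    survOf g H cn = survOf g₁ H cn := by
  unfold survOf
  congr 1
  apply List.map_congr_left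
  intro rn hrn
  exact h rn (List.mem_range.mp hrn)

theorem pv_gravity_fold (H N : Nat) (g₁ : List (List (Option Char))) :
    ∀ (csn : List Nat), csn.Nodup → (∀ k ∈ csn, k < N) →
    ∀ g : List (List (Option Char)), g.length = H →
      (∀ rn, rn < H → (g.getD rn []).length = N) →
      (∀ rn cn, rn < H → cn ∈ csn → (g.getD rn []).getD cn none = (g₁.getD rn []).getD cn none) →
      (csn.foldl (fun g (cn : Nat) => gstep H g (cn:Int)) g).length = H ∧
      (∀ rn, rn < H → ((csn.foldl (fun g (cn : Nat) => gstep H g (cn:Int)) g).getD rn []).length = N) ∧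
      (∀ rn cn : Nat, rn < H → cn < N →
        ((csn.foldl (fun g (cn : Nat) => gstep H g (cn:Int)) g).getD rn []).getD cn none
          = if cn ∈ csn then paddedD g₁ H cn rn else (g.getD rn []).getD cn none) := by
  intro csn
  induction csn with
  | nil =>
    intro _ _ g hgl hgr _
    exact ⟨hgl, hgr, fun rn cn _ _ => by simp⟩
  | cons c rest ih =>
    intro hnd hbd g hgl hgr horig
    have hcN : c < N := hbd c (by simp)
    have hndr := (List.nodup_cons.mp hnd).2
    have hcni : c ∉ rest := (List.nodup_cons.mp hnd).1
    set g₂ := gstep H g ((c:Nat):Int) with hg₂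
    obtain ⟨hlen₂, hrows₂⟩ := pv_gstep_spec H g ((c:Nat):Int) (by omega)
    have hct : (((c:Nat):Int)).toNat = c := by omega
    rw [hct] at hrows₂
    -- the column written into g₂ is the gravity of g's column c, which equals g₁'s
    have hsurv : survOf g H c = survOf g₁ H c :=
      pv_surv_congr H N g g₁ c (fun rn hrn => horig rn c hrn (by simp))
    have hlen₂' : g₂.length = H := by rw [hg₂, hlen₂, hgl]
    have hrow₂ : ∀ rn, rn < H → (g₂.getD rn []).length = N := by
      intro rn hrn
      rw [hg₂, hrows₂ rn, if_pos ⟨List.mem_range.mpr hrn, by omega⟩,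
        PySem.List.length_pySetD]
      exact hgr rn hrn
    have hcell₂ : ∀ rn cn : Nat, rn < H →
        (g₂.getD rn []).getD cn none
          = if c = cn then paddedD g₁ H c rn else (g.getD rn []).getD cn none := by
      intro rn cn hrn
      rw [hg₂, hrows₂ rn, if_pos ⟨List.mem_range.mpr hrn, by omega⟩,
        pv_rowset_getD _ _ (by omega) _ cn, hct]
      by_cases heq : c = cn
      · rw [if_pos ⟨heq, by rw [hgr rn hrn]; omega⟩, if_pos heq]
        unfold paddedD
        rw [hsurv, pv_pyGetD_eq_getD _ _ _ (by omega), (by omega : ((rn:Nat):Int).toNat = rn)]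
      · rw [if_neg (fun h => heq h.1), if_neg heq]
    obtain ⟨ihl, ihr, ihc⟩ := ih hndr (fun k hk => hbd k (by simp [hk])) g₂ hlen₂' hrow₂
      (by
        intro rn cn hrn hcn
        rw [hcell₂ rn cn hrn, if_neg (fun h => hcni (by rw [h]; exact hcn))]
        exact horig rn cn hrn (by simp [hcn]))
    refine ⟨by rw [List.foldl_cons]; exact ihl, by rw [List.foldl_cons]; exact ihr, ?_⟩
    intro rn cn hrn hcn
    rw [List.foldl_cons, ihc rn cn hrn hcn]
    by_cases hmem : cn ∈ rest
    · rw [if_pos hmem, if_pos (by simp [hmem])]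
    · rw [if_neg hmem, hcell₂ rn cn hrn]
      by_cases heq : c = cn
      · rw [if_pos heq, if_pos (by simp [heq]), heq]
      · rw [if_neg heq, if_neg (by
          intro h
          rcases List.mem_cons.mp h with he | he
          · exact heq he.symm
          · exact hmem he)]

theorem pv_map_range_rev {α : Type} (n : Nat) (f : Nat → α) :
    (List.range n).map f = ((List.range n).map (fun k => f (n-1-k))).reverse := by
  apply List.ext_getElem
  · simp
  · intro i h1 h2
    rw [List.getElem_reverse]
    simp only [List.getElem_map, List.getElem_range, List.length_reverse, List.length_map,
      List.length_range] at h1 h2 ⊢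
    congr 1
    omega

theorem pv_cell_rowsOf' (H N : Nat) (cols : List (List Char)) (rn cn : Nat)
    (hrn : rn < H) (hcn : cn < N) :
    ((rowsOf H N cols).getD rn []).getD cn none = cellOf cols H cn rn := by
  rw [pv_row_rowsOf H N cols rn hrn]
  simp [List.getD_eq_getElem?_getD, hcn]

theorem pv_rowlen_rowsOf (H N : Nat) (cols : List (List Char)) (rn : Nat) (hrn : rn < H) :
    ((rowsOf H N cols).getD rn []).length = N := by
  rw [pv_row_rowsOf H N cols rn hrn]
  simp

theorem pv_pad_getD (H : Nat) (col : List Char) (hle : col.length ≤ H) (rn : Nat) (hrn : rn < H) :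
    (List.replicate (H - ((col.map some).reverse).length) (none : Option Char)
      ++ (col.map some).reverse).getD rn none = col[H-1-rn]? := by
  have hl : ((col.map some).reverse).length = col.length := by simp
  rw [List.getD_eq_getElem?_getD, List.getElem?_append, List.length_replicate, hl]
  by_cases h : rn < H - col.length
  · rw [if_pos h, List.getElem?_replicate, if_pos h]
    rw [List.getElem?_eq_none (by omega)]
    rfl
  · rw [if_neg h, List.getElem?_reverse (by simp only [List.length_map]; omega)]
    simp only [List.length_map]
    rw [List.getElem?_map, List.getElem?_eq_getElem (by omega : col.length - 1 - (rn - (H - col.length)) < col.length)]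
    rw [List.getElem?_eq_getElem (by omega : H - 1 - rn < col.length)]
    simp only [Option.map_some, Option.getD_some, Option.some.injEq]
    congr 1
    omega

theorem pv_marked_nonneg (n H : Int) (g : List (List (Option Char))) (p : Int × Int)
    (hp : p ∈ scanB n H g) : 0 ≤ p.1 ∧ 0 ≤ p.2 := by
  rw [pv_mem_scanB] at hp
  obtain ⟨r, c, ⟨hr0, hr1⟩, ⟨hc0, hc1⟩, _, hcell⟩ := hp
  rcases hcell with rfl | rfl | rfl | rfl <;> exact ⟨by omega, by omega⟩

theorem pv_surv_marked (H N : Nat) (cols : List (List Char)) (hWF : WFc H N cols)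
    (cn : Nat) (hcn : cn < N) :
    survOf (markB (scanB (N:Int) (H:Int) (rowsOf H N cols)) (rowsOf H N cols)) H cn
      = ((keepL (cols.getD cn [])
          (fun k => decide (((cn:Int),(k:Int)) ∉ scanA (H:Int) (N:Int) cols))).map some).reverse := by
  obtain ⟨hclen, hcbd⟩ := hWF
  set g := rowsOf H N cols with hg
  set marked := scanB (N:Int) (H:Int) g with hmk
  set temp := scanA (H:Int) (N:Int) cols with htm
  set colc := cols.getD cn [] with hcolc
  have hL : colc.length ≤ H := by
    have h : cn < cols.length := by omega
    have he : colc = cols[cn] := by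
      rw [hcolc, List.getD_eq_getElem?_getD, List.getElem?_eq_getElem h]
      rfl
    rw [he]
    exact hcbd _ (List.getElem_mem _)
  have hmnn : ∀ p ∈ marked, 0 ≤ p.1 ∧ 0 ≤ p.2 := fun p hp => pv_marked_nonneg _ _ _ p hp
  have hval : ∀ rn : Nat, rn < H →
      ((markB marked g).getD rn []).getD cn none
        = if ((rn:Int),(cn:Int)) ∈ marked then none else cellOf cols H cn rn := by
    intro rn hrn
    rw [pv_markB_cell marked hmnn g rn cn (by rw [hg, pv_length_rowsOf]; omega)
      (by rw [hg, pv_rowlen_rowsOf _ _ _ _ hrn]; omega), hg, pv_cell_rowsOf' H N cols rn cn hrn hcn]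
  have hmem_iff : ∀ rn : Nat, rn < H →
      (((rn:Int),(cn:Int)) ∈ marked ↔ ((cn:Int), (H:Int)-1-(rn:Int)) ∈ temp) := by
    intro rn hrn
    rw [hmk, hg, pv_scan_corr]
    constructor
    · rintro ⟨p, hp, heq⟩
      simp only [Prod.mk.injEq] at heq
      have hb := pv_temp_bounds _ _ _ p hp
      have : p = ((cn:Int), (H:Int)-1-(rn:Int)) := Prod.ext (by omega) (by omega)
      rw [← this]
      exact hp
    · intro hp
      refine ⟨_, hp, ?_⟩
      show ((rn:Int),(cn:Int)) = ((H:Int)-1-((H:Int)-1-(rn:Int)), (cn:Int))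
      rw [(by omega : (H:Int)-1-((H:Int)-1-(rn:Int)) = (rn:Int))]
  unfold survOf
  rw [List.map_congr_left (fun rn hrn => hval rn (List.mem_range.mp hrn))]
  rw [pv_map_range_rev H, List.filter_reverse]
  congr 1
  have hf' : ∀ k ∈ List.range H,
      (if (((H-1-k : Nat):Int),(cn:Int)) ∈ marked then none else cellOf cols H cn (H-1-k))
        = if ((cn:Int),(k:Int)) ∈ temp then none else colc[k]? := by
    intro k hk
    have hkH : k < H := List.mem_range.mp hk
    have h1 : (((H-1-k : Nat):Int),(cn:Int)) ∈ marked ↔ ((cn:Int),(k:Int)) ∈ temp := by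
      rw [hmem_iff (H-1-k) (by omega)]
      have : (H:Int)-1-((H-1-k : Nat):Int) = (k:Int) := by omega
      rw [this]
    have h2 : cellOf cols H cn (H-1-k) = colc[k]? := by
      unfold cellOf
      rw [← hcolc, (by omega : H-1-(H-1-k) = k)]
    rw [h2]
    by_cases hm : ((cn:Int),(k:Int)) ∈ temp
    · rw [if_pos (h1.mpr hm), if_pos hm]
    · rw [if_neg (fun h => hm (h1.mp h)), if_neg hm]
  rw [List.map_congr_left hf']
  have hsplit : List.range H = List.range colc.length
      ++ (List.range (H - colc.length)).map (fun t => colc.length + t) := by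
    rw [← List.range_add]
    congr 1
    omega
  rw [hsplit, List.map_append, List.filter_append]
  have hsecond : List.filter (fun v => decide (v ≠ none))
      (((List.range (H - colc.length)).map (fun t => colc.length + t)).map
        (fun (k : Nat) => if ((cn:Int),(k:Int)) ∈ temp then none else colc[k]?)) = [] := by
    apply List.filter_eq_nil_iff.mpr
    intro v hv
    obtain ⟨k, hk, rfl⟩ := List.mem_map.mp hv
    obtain ⟨t, _, rfl⟩ := List.mem_map.mp hk
    have : colc[colc.length + t]? = none := List.getElem?_eq_none (by omega)
    rw [this]
    simp
  rw [hsecond, List.append_nil]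
  rw [List.filter_map]
  have hpred : List.filter ((fun v => decide (v ≠ none)) ∘
        (fun (k : Nat) => if ((cn:Int),(k:Int)) ∈ temp then none else colc[k]?)) (List.range colc.length)
      = List.filter (fun (k : Nat) => decide (((cn:Int),(k:Int)) ∉ temp)) (List.range colc.length) := by
    apply List.filter_congr
    intro k hk
    have hkL : k < colc.length := List.mem_range.mp hk
    simp only [Function.comp_apply]
    by_cases hm : ((cn:Int),(k:Int)) ∈ temp
    · rw [if_pos hm]
      simp [hm]
    · rw [if_neg hm, List.getElem?_eq_getElem hkL]
      simp [hm]
  rw [hpred]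
  unfold keepL
  rw [List.map_map]
  apply List.map_congr_left
  intro k hk
  have hkm := List.mem_filter.mp hk
  have hkL : k < colc.length := List.mem_range.mp hkm.1
  have hnm : ((cn:Int),(k:Int)) ∉ temp := by simpa using hkm.2
  simp only [Function.comp_apply]
  rw [if_neg hnm, List.getElem?_eq_getElem hkL, List.getD_eq_getElem?_getD,
    List.getElem?_eq_getElem hkL]
  rfl

theorem pv_getElem?_eq_getD {α : Type} (l : List α) (i : Nat) (d : α) (h : i < l.length) :
    l[i]? = some (l.getD i d) := by
  rw [List.getElem?_eq_getElem h, List.getD_eq_getElem?_getD, List.getElem?_eq_getElem h]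
  rfl

theorem pv_keepL_le_H (H N : Nat) (cols : List (List Char)) (hWF : WFc H N cols)
    (cn : Nat) (hcn : cn < N) (K : Nat → Bool) :
    (keepL (cols.getD cn []) K).length ≤ H := by
  obtain ⟨hclen, hcbd⟩ := hWF
  refine le_trans (pv_keepL_length_le _ _) ?_
  have h : cn < cols.length := by omega
  have he : cols.getD cn [] = cols[cn] := by
    rw [List.getD_eq_getElem?_getD, List.getElem?_eq_getElem h]
    rfl
  rw [he]
  exact hcbd _ (List.getElem_mem _)

theorem pv_Bstep (H N : Nat) (cols : List (List Char)) (hWF : WFc H N cols) :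
    gravityB (N:Int) (H:Int) (markB (scanB (N:Int) (H:Int) (rowsOf H N cols)) (rowsOf H N cols))
      = rowsOf H N (removeA (PySem.List.sorted (scanA (H:Int) (N:Int) cols) (fun p => p.2) true) cols) := by
  set g₁ := markB (scanB (N:Int) (H:Int) (rowsOf H N cols)) (rowsOf H N cols) with hg₁
  have hmnn : ∀ p ∈ scanB (N:Int) (H:Int) (rowsOf H N cols), 0 ≤ p.1 :=
    fun p hp => (pv_marked_nonneg _ _ _ p hp).1
  have hlen₁ : g₁.length = H := by
    rw [hg₁, pv_markB_length, pv_length_rowsOf]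
  have hrow₁ : ∀ rn, rn < H → (g₁.getD rn []).length = N := by
    intro rn hrn
    rw [hg₁, pv_markB_rowlen _ hmnn, pv_rowlen_rowsOf _ _ _ _ hrn]
  obtain ⟨hGl, hGr, hGc⟩ := pv_gravity_fold H N g₁ (List.range N) List.nodup_range
    (fun k hk => List.mem_range.mp hk) g₁ hlen₁ hrow₁ (fun _ _ _ _ => rfl)
  rw [pv_gravityB_eq]
  set newcols := removeA (PySem.List.sorted (scanA (H:Int) (N:Int) cols) (fun p => p.2) true) cols
    with hnew
  set G := List.foldl (fun g (cn : Nat) => gstep H g (cn:Int)) g₁ (List.range N) with hG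
  apply List.ext_getElem?
  intro rn
  by_cases hrn : rn < H
  · rw [pv_getElem?_eq_getD G rn [] (by omega),
      pv_getElem?_eq_getD (rowsOf H N newcols) rn [] (by rw [pv_length_rowsOf]; omega)]
    congr 1
    apply List.ext_getElem?
    intro cn
    by_cases hcn : cn < N
    · rw [pv_getElem?_eq_getD _ cn none (by rw [hGr rn hrn]; omega),
        pv_getElem?_eq_getD _ cn none (by rw [pv_rowlen_rowsOf _ _ _ _ hrn]; omega)]
      congr 1
      rw [hGc rn cn hrn hcn, if_pos (List.mem_range.mpr hcn),
        pv_cell_rowsOf' H N newcols rn cn hrn hcn]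
      unfold paddedD
      rw [hg₁, pv_surv_marked H N cols hWF cn hcn]
      rw [pv_pad_getD H _ (pv_keepL_le_H H N cols hWF cn hcn _) rn hrn]
      unfold cellOf
      rw [hnew, pv_newcols_col H N cols hWF.1 cn hcn]
    · rw [List.getElem?_eq_none (by rw [hGr rn hrn]; omega),
        List.getElem?_eq_none (by rw [pv_rowlen_rowsOf _ _ _ _ hrn]; omega)]
  · rw [List.getElem?_eq_none (by rw [hGl]; omega),
      List.getElem?_eq_none (by rw [pv_length_rowsOf]; omega)]

theorem pv_loop (H N : Nat) : ∀ (fuel : Nat) (cols : List (List Char)) (ans : Int),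
    WFc H N cols →
    loopA (H:Int) (N:Int) fuel cols ans = loopB (N:Int) (H:Int) fuel (rowsOf H N cols) ans := by
  intro fuel
  induction fuel with
  | zero => intro cols ans _; rfl
  | succ fuel ih =>
    intro cols ans hWF
    simp only [loopA, loopB]
    by_cases he : scanA (H:Int) (N:Int) cols = []
    · rw [if_pos he, if_pos ((pv_scan_empty H N cols).mpr he)]
    · rw [if_neg he, if_neg (fun h => he ((pv_scan_empty H N cols).mp h)),
        pv_scan_len H N cols, pv_Bstep H N cols hWF]
      exact ih _ _ (pv_newcols_WF H N cols hWF)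

theorem pv_getD_map_range {α : Type} (N : Nat) (f : Nat → α) (d : α) (c : Nat) (hc : c < N) :
    ((List.range N).map f).getD c d = f c := by
  rw [List.getD_eq_getElem?_getD, List.getElem?_map, List.getElem?_range hc]
  rfl

theorem pv_foldl_min_const (N : Nat) :
    ∀ l : List (List Char), (∀ s ∈ l, s.length = N) → l.foldl (fun a s => min a s.length) N = N := by
  intro l
  induction l with
  | nil => intro _; rfl
  | cons s t ih =>
    intro h
    rw [List.foldl_cons, h s (by simp), min_self]
    exact ih (fun q hq => h q (by simp [hq]))

theorem pv_filterMap_getElem (N c : Nat) (hc : c < N) :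
    ∀ rows : List (List Char), (∀ s ∈ rows, s.length = N) →
      rows.filterMap (fun s => s[c]?) = rows.map (fun s => s.getD c ' ') := by
  intro rows
  induction rows with
  | nil => intro _; rfl
  | cons s t ih =>
    intro h
    have hs : c < s.length := by rw [h s (by simp)]; omega
    rw [List.filterMap_cons, List.map_cons, List.getElem?_eq_getElem hs,
      ih (fun q hq => h q (by simp [hq]))]
    rw [List.getD_eq_getElem?_getD, List.getElem?_eq_getElem hs]
    rfl

theorem pv_zip_init (board : List String) (N : Nat) (hne : board ≠ [])
    (hrows : ∀ s ∈ board, s.toList.length = N) :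
    pyZipStar (board.map String.toList)
      = (List.range N).map (fun c => (board.map String.toList).map (fun s => s.getD c ' ')) := by
  match hb : board, hne with
  | b :: bs, _ =>
    show pyZipStar (b.toList :: bs.map String.toList) = _
    unfold pyZipStar
    dsimp only
    simp only [List.map_cons]
    have hrows' : ∀ s ∈ b.toList :: bs.map String.toList, s.length = N := by
      intro s hs
      rcases List.mem_cons.mp hs with rfl | hs
      · exact hrows b (by simp)
      · obtain ⟨t, ht, rfl⟩ := List.mem_map.mp hs
        exact hrows t (by simp [ht])
    have hb0 : b.toList.length = N := hrows' _ (by simp)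
    rw [hb0, pv_foldl_min_const N _ hrows']
    apply List.map_congr_left
    intro c hc
    exact pv_filterMap_getElem N c (List.mem_range.mp hc) _ hrows'

theorem pv_init (board : List String) (N : Nat) (hne : board ≠ [])
    (hrows : ∀ s ∈ board, s.toList.length = N) :
    WFc board.length N ((pyZipStar (board.map String.toList)).map List.reverse)
    ∧ rowsOf board.length N ((pyZipStar (board.map String.toList)).map List.reverse)
        = board.map (fun row => row.toList.map (fun ch => (some ch : Option Char)))
    ∧ ((((pyZipStar (board.map String.toList)).map List.reverse).map List.length).sum + 1
        = (((board.map (fun row => row.toList.map (fun ch => (some ch : Option Char)))).map List.length).sum + 1)) := by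
  set H := board.length with hH
  rw [pv_zip_init board N hne hrows, List.map_map]
  set rowsL := board.map String.toList with hrowsL
  set cols := (List.range N).map (List.reverse ∘ fun c => rowsL.map (fun s => s.getD c ' ')) with hcols
  have hrowsLlen : rowsL.length = H := by rw [hrowsL, List.length_map]
  have hcolsgetD : ∀ cn : Nat, cn < N →
      cols.getD cn [] = (rowsL.map (fun s => s.getD cn ' ')).reverse := by
    intro cn hcn
    rw [hcols, pv_getD_map_range N _ [] cn hcn]
    rfl
  have hWF : WFc H N cols := by
    constructor
    · rw [hcols, List.length_map, List.length_range]
    · intro col hcol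
      rw [hcols] at hcol
      obtain ⟨c, _, rfl⟩ := List.mem_map.mp hcol
      simp only [Function.comp_apply, List.length_reverse, List.length_map]
      rw [hrowsL, List.length_map]
  refine ⟨hWF, ?_, ?_⟩
  · apply List.ext_getElem?
    intro rn
    by_cases hrn : rn < H
    · rw [pv_getElem?_eq_getD _ rn [] (by rw [pv_length_rowsOf]; omega),
        pv_getElem?_eq_getD _ rn [] (by rw [List.length_map]; omega)]
      congr 1
      rw [pv_row_rowsOf _ _ _ _ hrn]
      have hrowval : (board.map (fun row => row.toList.map (fun ch => (some ch : Option Char)))).getD rn []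
          = board[rn].toList.map (fun ch => (some ch : Option Char)) := by
        rw [List.getD_eq_getElem?_getD, List.getElem?_map,
          List.getElem?_eq_getElem (by omega : rn < board.length)]
        rfl
      rw [hrowval]
      have hlenrow : board[rn].toList.length = N := hrows _ (List.getElem_mem _)
      apply List.ext_getElem?
      intro cn
      by_cases hcn : cn < N
      · rw [List.getElem?_map, List.getElem?_range hcn, List.getElem?_map,
          List.getElem?_eq_getElem (by omega : cn < board[rn].toList.length)]
        simp only [Option.map_some]
        congr 1
        unfold cellOf
        rw [hcolsgetD cn hcn,
          List.getElem?_reverse (by rw [List.length_map, hrowsLlen]; omega)]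
        rw [List.length_map, hrowsLlen]
        rw [(by omega : H - 1 - (H - 1 - rn) = rn)]
        rw [List.getElem?_map, hrowsL, List.getElem?_map,
          List.getElem?_eq_getElem (by omega : rn < board.length)]
        simp only [Option.map_some]
        rw [List.getD_eq_getElem?_getD, List.getElem?_eq_getElem (by omega : cn < board[rn].toList.length)]
        rfl
      · rw [List.getElem?_eq_none (by rw [List.length_map, List.length_range]; omega),
          List.getElem?_eq_none (by rw [List.length_map]; omega)]
    · rw [List.getElem?_eq_none (by rw [pv_length_rowsOf]; omega),
        List.getElem?_eq_none (by rw [List.length_map]; omega)]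
  · have h1 : cols.map List.length = List.replicate N H := by
      apply List.eq_replicate_iff.mpr
      refine ⟨by rw [List.length_map, hcols, List.length_map, List.length_range], ?_⟩
      intro b hb
      obtain ⟨col, hcol, rfl⟩ := List.mem_map.mp hb
      rw [hcols] at hcol
      obtain ⟨c, _, rfl⟩ := List.mem_map.mp hcol
      simp only [Function.comp_apply, List.length_reverse, List.length_map]
      rw [hrowsL, List.length_map]
    have h2 : (board.map (fun row => row.toList.map (fun ch => (some ch : Option Char)))).map List.length
        = List.replicate H N := by
      apply List.eq_replicate_iff.mpr
      refine ⟨by rw [List.length_map, List.length_map], ?_⟩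
      intro b hb
      obtain ⟨x, hx, rfl⟩ := List.mem_map.mp hb
      obtain ⟨row, hrow, rfl⟩ := List.mem_map.mp hx
      rw [List.length_map]
      exact hrows row hrow
    rw [h1, h2, List.sum_replicate, List.sum_replicate, smul_eq_mul, smul_eq_mul,
      Nat.mul_comm]

theorem pv_foldl_const {α β : Type} : ∀ (l : List α) (t : β), l.foldl (fun t _ => t) t = t := by
  intro l
  induction l with
  | nil => intro t; rfl
  | cons a l ih => intro t; rw [List.foldl_cons]; exact ih t

theorem pv_solA_triv (m n : Int) (board : List String) (hn : n ≤ 1) : solution m n board = 0 := by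
  unfold solution
  dsimp only
  have hA : scanA m n ((pyZipStar (board.map String.toList)).map List.reverse) = [] := by
    unfold scanA
    rw [PySem.List.pyRange_one_eq_nil (by omega : n - 1 ≤ 0)]
    rfl
  simp [loopA, hA]

theorem pv_solB_triv (m n : Int) (board : List String) (hn : n ≤ 1) : solution_alt m n board = 0 := by
  unfold solution_alt
  dsimp only
  have hB : scanB n ((board.length : Int))
      (board.map (fun row => row.toList.map (fun ch => (some ch : Option Char)))) = [] := by
    unfold scanB
    have hnil : PySem.List.pyRange 0 (n-1) 1 = [] := PySem.List.pyRange_one_eq_nil (by omega)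
    simp only [hnil, List.foldl_nil]
    exact pv_foldl_const _ _
  simp [loopB, hB]

-- ===== VERDICT (by name: the statement is the Claim_ definition above) =====
theorem solution_spec : Claim_equal_solution := by
  unfold Claim_equal_solution
  intro m n board _ hPre
  unfold Spec_solution
  by_cases hn1 : n ≤ 1
  · rw [pv_solA_triv m n board hn1, pv_solB_triv m n board hn1]
  · obtain ⟨hb, hm, hrows⟩ := hPre.resolve_left hn1
    have hnN : n = ((n.toNat : Nat) : Int) := by omega
    have hmH : m = ((board.length : Nat) : Int) := by omega
    have hrowsN : ∀ s ∈ board, s.toList.length = n.toNat := by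
      intro s hs
      have h1 := hrows s hs
      have h2 : s.toList.length = s.length := rfl
      omega
    obtain ⟨hWF0, hrows0, hfuel⟩ := pv_init board n.toNat hb hrowsN
    unfold solution solution_alt
    dsimp only
    rw [hmH, hnN, hfuel, pv_loop board.length n.toNat _ _ 0 hWF0, hrows0]
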